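-- pv_equiv track=rewrite | github.com/eroicaleo/LearningPython | interview/leet/030_Substring_with_Concatenation_of_All_Words.py | getUniqueWordsAndScoreList
-- ===== SOURCE A (Python) =====
-- def getUniqueWordsAndScoreList(words):
--     wordsDict = dict()
--     uniqueWordsList = []
--     scoreList = []
--     for word in words:
--         if not word in wordsDict:
--             uniqueWordsList.append(word)
--             wordsDict[word] = len(uniqueWordsList) - 1
--             scoreList.append(1)
--         else:
--             scoreList[wordsDict[word]] += 1
--     return wordsDict, uniqueWordsList, scoreList
-- ===== SOURCE B (Python) =====
-- def getUniqueWordsAndScoreList(words):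
--     # No dict anywhere: a word is unique-list material iff this is its first
--     # occurrence (words.index(w) == i); counts come from list.count over the
--     # whole list; the index dict is derived from `unique` at the end.
--     unique = [w for i, w in enumerate(words) if words.index(w) == i]
--     wordsDict = {w: i for i, w in enumerate(unique)}
--     scoreList = [words.count(w) for w in unique]
--     return wordsDict, unique, scoreList
-- ===== Notes on version B (the rewrite author's own statement) =====
-- stated objective: alternative
-- what changed: A maintains a hash dict, unique list and score list incrementally in one pass with a seen/unseen branch; B uses no dict at all: it selects first occurrences by the index test words.index(w) == i, counts each unique word with list.count over the whole list, and only then derives the index dict from the unique list, trading A's linear hashing for dict-free quadratic list scans.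
import Mathlib
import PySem

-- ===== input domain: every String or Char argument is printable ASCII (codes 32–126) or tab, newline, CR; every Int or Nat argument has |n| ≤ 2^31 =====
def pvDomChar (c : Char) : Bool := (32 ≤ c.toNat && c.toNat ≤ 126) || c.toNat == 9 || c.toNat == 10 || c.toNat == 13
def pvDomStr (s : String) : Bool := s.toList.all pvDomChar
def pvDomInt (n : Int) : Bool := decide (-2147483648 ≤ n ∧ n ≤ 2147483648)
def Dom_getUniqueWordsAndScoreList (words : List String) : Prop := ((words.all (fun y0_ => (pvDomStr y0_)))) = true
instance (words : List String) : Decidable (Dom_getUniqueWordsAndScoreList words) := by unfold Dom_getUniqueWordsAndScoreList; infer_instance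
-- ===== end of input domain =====

-- B drops the dict entirely: first occurrences are selected by an index test,
-- counts come from list.count over the whole input, and the index dict is derived
-- from the unique list afterwards (alternative decomposition; quadratic, not faster).

-- ===== PORT A =====
-- pvStepFn is the body of A's 'for word in words' loop, named so the proofs can refer to it
def pvStepFn (st : PySem.Dict String Int × List String × List Int) (word : String) :
    PySem.Dict String Int × List String × List Int :=
  let d := st.1
  let u := st.2.1
  let s := st.2.2
  if !(d.contains word) then
    let u' := u ++ [word]
    (d.insert word ((u'.length : Int) - 1), u', s ++ [1])
  else
    let i := d.getD word 0
    (d, u, PySem.List.pySetD s i (PySem.List.pyGetD s i 0 + 1))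

def getUniqueWordsAndScoreList (words : List String) : (List (String × Int)) × List String × List Int :=
  let st := words.foldl pvStepFn (PySem.Dict.empty, [], [])
  (st.1.items, st.2.1, st.2.2)

-- ===== PORT B =====
def getUniqueWordsAndScoreList_alt (words : List String) : (List (String × Int)) × List String × List Int :=
  -- 'words.index(w) == i': index? is list.index (never none here since w ∈ words)
  let unique := ((PySem.List.enumerate words).filter
      (fun p => (PySem.List.index? words p.2).map (fun n => (n : Int)) == some p.1)).map (fun p => p.2)
  let wordsDict := (PySem.List.enumerate unique).map (fun p => (p.2, p.1))
  let scoreList := unique.map (fun w => (PySem.List.count words w : Int))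
  (wordsDict, unique, scoreList)

-- ===== PRECONDITION & SPEC =====
def Spec_getUniqueWordsAndScoreList (words : List String) (out : (List (String × Int)) × List String × List Int) : Prop := out = getUniqueWordsAndScoreList_alt words
instance (words : List String) (out : (List (String × Int)) × List String × List Int) : Decidable (Spec_getUniqueWordsAndScoreList words out) := by unfold Spec_getUniqueWordsAndScoreList; infer_instance

-- ===== CLAIM (what is proved, stated in full; the proofs are below) =====
def Claim_equal_getUniqueWordsAndScoreList : Prop := ∀ (words : List String), Dom_getUniqueWordsAndScoreList words → Spec_getUniqueWordsAndScoreList words (getUniqueWordsAndScoreList words)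

-- ===== LEMMAS AND PROOFS =====

def pvDictOf (p : List String) : PySem.Dict String Int :=
  PySem.Dict.mk ((PySem.List.enumerate (PySem.List.dedup p)).map (fun q => (q.2, q.1)))
lemma pvKeys_dictOf (p : List String) : (pvDictOf p).keys = PySem.List.dedup p := by
  have h : ((fun x : String × Int => x.1) ∘ fun q : Int × String => (q.2, q.1))
      = fun q : Int × String => q.2 := rfl
  simp [pvDictOf, PySem.Dict.keys_mk, List.map_map, h]
lemma pvContains_dictOf (p : List String) (w : String) :
    (pvDictOf p).contains w = decide (w ∈ p) := by
  rw [PySem.Dict.contains_eq_decide_mem_keys, pvKeys_dictOf]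
  simp
lemma pvGetD_dictOf (p : List String) (w : String) (hw : w ∈ p) :
    (pvDictOf p).getD w 0 = ((PySem.List.dedup p).idxOf w : Int) := by
  have hnd : (pvDictOf p).keys.Nodup := by rw [pvKeys_dictOf]; exact PySem.List.nodup_dedup p
  have hmem : w ∈ PySem.List.dedup p := by simp [hw]
  have hlt : (PySem.List.dedup p).idxOf w < (PySem.List.dedup p).length := List.idxOf_lt_length_of_mem hmem
  have hget : (PySem.List.dedup p)[(PySem.List.dedup p).idxOf w] = w := List.getElem_idxOf hlt
  have hitem : (w, ((PySem.List.dedup p).idxOf w : Int)) ∈ (pvDictOf p).items := by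
    simp only [pvDictOf]
    refine List.mem_map.mpr ⟨(((PySem.List.dedup p).idxOf w : Int), w), ?_, rfl⟩
    exact (PySem.List.mem_enumerate_iff _ _ _).mpr ⟨(PySem.List.dedup p).idxOf w, hlt, by simp⟩
  exact PySem.Dict.getD_of_mem_items _ hitem hnd 0

def pvStateOf (p : List String) : PySem.Dict String Int × List String × List Int :=
  (pvDictOf p, PySem.List.dedup p, (PySem.List.dedup p).map (fun v => (p.count v : Int)))

lemma pvDedup_append_mem (p : List String) (w : String) (h : w ∈ p) :
    PySem.List.dedup (p ++ [w]) = PySem.List.dedup p := by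
  simp only [PySem.List.dedup_eq_ofList, PySem.Set.ofList_eq_foldl, List.foldl_append, List.foldl]
  rw [← PySem.Set.ofList_eq_foldl]
  simp [PySem.Set.add, PySem.Set.contains, h]

lemma pvDedup_append_not_mem (p : List String) (w : String) (h : w ∉ p) :
    PySem.List.dedup (p ++ [w]) = PySem.List.dedup p ++ [w] := by
  simp only [PySem.List.dedup_eq_ofList, PySem.Set.ofList_eq_foldl, List.foldl_append, List.foldl]
  rw [← PySem.Set.ofList_eq_foldl]
  simp [PySem.Set.add, PySem.Set.contains, h]

lemma pvStep (p : List String) (w : String) :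
    pvStepFn (pvStateOf p) w = pvStateOf (p ++ [w]) := by
  unfold pvStepFn
  by_cases hw : w ∈ p
  · -- seen before: else branch
    have hd : pvDictOf (p ++ [w]) = pvDictOf p := by
      unfold pvDictOf; rw [pvDedup_append_mem p w hw]
    simp only [pvStateOf, pvContains_dictOf, hw, decide_true, Bool.not_true, Bool.false_eq_true,
      if_false, pvGetD_dictOf p w hw, pvDedup_append_mem p w hw, hd, Prod.mk.injEq, true_and]
    have hlt : (PySem.List.dedup p).idxOf w < (PySem.List.dedup p).length :=
      List.idxOf_lt_length_of_mem (by simp [hw])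
    have hnd : (PySem.List.dedup p).Nodup := PySem.List.nodup_dedup p
    have hgetw : (PySem.List.dedup p)[(PySem.List.dedup p).idxOf w] = w := List.getElem_idxOf hlt
    rw [PySem.List.pySetD_natCast, PySem.List.pyGetD_natCast]
    have hgd : ((PySem.List.dedup p).map (fun v => (p.count v : Int))).getD
        ((PySem.List.dedup p).idxOf w) 0 = (p.count w : Int) := by
      rw [List.getD_eq_getElem _ _ (by simpa using hlt)]
      simp
    apply List.ext_getElem
    · simp
    intro k hk1 hk2
    simp only [List.getElem_set, List.getElem_map]
    by_cases hkj : (PySem.List.dedup p).idxOf w = k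
    · subst hkj
      rw [if_pos rfl, hgd, hgetw]
      simp [List.count_append]
    · rw [if_neg hkj]
      have hk : k < (PySem.List.dedup p).length := by simpa using hk2
      have hne : w ≠ (PySem.List.dedup p)[k] := by
        intro he
        exact hkj (hnd.getElem_inj_iff.mp (hgetw.trans he))
      simp [List.count_append]
      exact List.count_eq_zero.mpr (by simpa using fun he => hne he.symm)
  · -- new word: then branch
    simp only [pvStateOf, pvContains_dictOf, hw, decide_false, Bool.not_false, if_true,
      pvDedup_append_not_mem p w hw, Prod.mk.injEq, true_and]
    refine ⟨?_, ?_⟩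
    · -- dict
      apply PySem.Dict.ext
      rw [PySem.Dict.items_insert_of_not_contains _ _
        (show (pvDictOf p).contains w = false by simp [pvContains_dictOf, hw])]
      simp only [pvDictOf, pvDedup_append_not_mem p w hw, PySem.List.enumerate_append,
        List.map_append]
      congr 1
      simp [PySem.List.enumerate_cons, PySem.List.enumerate_nil]
    · -- scores
      rw [List.map_append, List.map_singleton]
      congr 1
      · apply List.map_congr_left
        intro v hv
        have hv' : v ∈ p := by simpa using (PySem.List.mem_dedup _ _).mp hv
        have hne : v ≠ w := fun he => hw (he ▸ hv')
        simp [List.count_append, Ne.symm hne]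
      · have h0 : p.count w = 0 := List.count_eq_zero.mpr hw
        simp [List.count_append, h0]

lemma pvLoop (rest p : List String) :
    rest.foldl pvStepFn (pvStateOf p) = pvStateOf (p ++ rest) := by
  induction rest generalizing p with
  | nil => simp
  | cons w rest ih =>
    rw [List.foldl_cons, pvStep p w, ih (p ++ [w])]
    simp

-- B's comprehension '[w for i, w in enumerate(words) if words.index(w) == i]'
-- selects exactly the first occurrences, i.e. PySem.List.dedup
lemma pvAltUnique_eq_dedup (ws : List String) :
    ((PySem.List.enumerate ws).filter
        (fun p => (PySem.List.index? ws p.2).map (fun n => (n : Int)) == some p.1)).map (fun p => p.2)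
      = PySem.List.dedup ws := by
  induction ws using List.reverseRecOn with
  | nil => simp [PySem.List.enumerate_nil]
  | append_singleton ws w ih =>
    rw [PySem.List.enumerate_append, List.filter_append, List.map_append]
    have hfirst : ((PySem.List.enumerate ws 0).filter
        (fun p => (PySem.List.index? (ws ++ [w]) p.2).map (fun n => (n : Int)) == some p.1))
        = (PySem.List.enumerate ws 0).filter
        (fun p => (PySem.List.index? ws p.2).map (fun n => (n : Int)) == some p.1) := by
      apply List.filter_congr
      intro p hp
      obtain ⟨k, hk, hpk⟩ := (PySem.List.mem_enumerate_iff _ _ _).mp hp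
      subst hpk
      rw [PySem.List.index?_append_of_mem [w] (ws.getElem_mem hk)]
    rw [hfirst, ih]
    by_cases hw : w ∈ ws
    · rw [pvDedup_append_mem ws w hw]
      obtain ⟨j, hj⟩ := Option.isSome_iff_exists.mp ((PySem.List.index?_isSome_iff ws w).mpr hw)
      obtain ⟨hjlt, -, -⟩ := PySem.List.getElem_of_index?_eq_some hj
      have hidx : PySem.List.index? (ws ++ [w]) w = some j := by
        rw [PySem.List.index?_append_of_mem [w] hw]; exact hj
      rw [PySem.List.index?_eq_idxOf?] at hidx
      simp [PySem.List.enumerate_cons, PySem.List.enumerate_nil, List.filter_cons, hidx]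
      omega
    · rw [pvDedup_append_not_mem ws w hw]
      have hidx := PySem.List.index?_append_singleton_self ws w hw
      rw [PySem.List.index?_eq_idxOf?] at hidx
      simp [PySem.List.enumerate_cons, PySem.List.enumerate_nil, hidx]

lemma pvFinal (words : List String) :
    getUniqueWordsAndScoreList words = getUniqueWordsAndScoreList_alt words := by
  unfold getUniqueWordsAndScoreList getUniqueWordsAndScoreList_alt
  have hA := pvLoop words []
  rw [show ((PySem.Dict.empty : PySem.Dict String Int), ([] : List String), ([] : List Int)) = pvStateOf [] from rfl, hA]
  rw [pvAltUnique_eq_dedup words]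
  simp only [List.nil_append, pvStateOf, pvDictOf, Prod.mk.injEq]
  refine ⟨trivial, trivial, ?_⟩
  apply List.map_congr_left
  intro v hv
  simp [PySem.List.count_eq]

-- ===== VERDICT (by name: the statement is the Claim_ definition above) =====
theorem getUniqueWordsAndScoreList_spec : Claim_equal_getUniqueWordsAndScoreList := by
  intro words _
  unfold Spec_getUniqueWordsAndScoreList
  exact pvFinal words
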